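-- pv_equiv track=rewrite | github.com/maraxen/PrxteinMPNN | src/prxteinmpnn/run/sampling.py | _split_ligand_payload_key
-- ===== SOURCE A (Python) =====
-- LIGAND_CONTEXT_KEYS = ("Y", "Y_t", "Y_m")
--
-- def _split_ligand_payload_key(payload_key: str) -> tuple[str, str] | None:
--   for tensor_name in LIGAND_CONTEXT_KEYS:
--     for separator in ("::", "/"):
--       suffix = f"{separator}{tensor_name}"
--       if payload_key.endswith(suffix):
--         structure_id = payload_key[: -len(suffix)]
--         if structure_id:
--           return structure_id, tensor_name
--   return None
-- ===== SOURCE B (Python) =====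
-- LIGAND_CONTEXT_KEYS = ("Y", "Y_t", "Y_m")
--
-- def _split_ligand_payload_key(payload_key: str) -> tuple[str, str] | None:
--   for separator in ("::", "/"):
--     head, found, name = payload_key.rpartition(separator)
--     if found and name in LIGAND_CONTEXT_KEYS and head:
--       return head, name
--   return None
-- ===== Notes on version B (the rewrite author's own statement) =====
-- stated objective: idiomatic
-- what changed: Replaces A's 6-combination nested scan (3 tensor names x 2 separators, each an endswith plus slice) by a 2-iteration loop that rpartitions the key at the last occurrence of each separator and does a single membership test of the tail against the key set.
import Mathlib
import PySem

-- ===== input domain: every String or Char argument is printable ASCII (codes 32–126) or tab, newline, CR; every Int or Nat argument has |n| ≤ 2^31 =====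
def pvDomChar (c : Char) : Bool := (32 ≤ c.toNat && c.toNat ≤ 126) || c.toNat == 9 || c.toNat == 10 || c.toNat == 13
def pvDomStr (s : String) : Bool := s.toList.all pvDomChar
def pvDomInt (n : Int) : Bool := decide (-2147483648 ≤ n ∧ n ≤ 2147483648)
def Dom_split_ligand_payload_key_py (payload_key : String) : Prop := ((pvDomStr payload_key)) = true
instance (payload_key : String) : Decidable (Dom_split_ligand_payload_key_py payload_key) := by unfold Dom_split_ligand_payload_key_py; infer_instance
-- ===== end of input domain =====

-- B replaces the 6-combination nested endswith scan by a 2-iteration rpartition loop with one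
-- membership lookup (objective: idiomatic/simpler decomposition; no speed claim).


-- ===== PORT A =====
-- inner loop 'for separator in ("::", "/")' of A, for a fixed tensor_name
def pyAInner (s : List Char) (name : List Char) : List (List Char) → Option (List Char × List Char)
  | [] => none
  | sep :: rest =>
    let suffix := sep ++ name
    if PySem.Chars.endswith s suffix then
      let structure_id := PySem.List.slice s none (some (-(suffix.length : Int)))
      if structure_id ≠ [] then some (structure_id, name) else pyAInner s name rest
    else pyAInner s name rest

-- outer loop 'for tensor_name in LIGAND_CONTEXT_KEYS' of A
def pyAOuter (s : List Char) : List (List Char) → Option (List Char × List Char)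
  | [] => none
  | name :: rest =>
    match pyAInner s name [[':', ':'], ['/']] with
    | some r => some r
    | none => pyAOuter s rest

def split_ligand_payload_key_py (payload_key : String) : Option (String × String) :=
  (pyAOuter payload_key.toList [['Y'], ['Y', '_', 't'], ['Y', '_', 'm']]).map
    (fun r => (String.ofList r.1, String.ofList r.2))

-- ===== PORT B =====
-- str.rpartition(sep) restricted to what B uses: 'some (head, tail)' when sep occurs
-- (split at the LAST occurrence), 'none' when it does not (Python's ('', '', s) with found = '').
-- Hand port, exact for nonempty sep (B only calls it with "::" and "/").
def rpartAux (sep : List Char) : List Char → Option (List Char × List Char)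
  | [] => none
  | c :: rest =>
    match rpartAux sep rest with
    | some (h, t) => some (c :: h, t)
    | none =>
      if sep.isPrefixOf (c :: rest) then some ([], (c :: rest).drop sep.length) else none

-- loop 'for separator in ("::", "/")' of B
def pyBLoop (s : List Char) : List (List Char) → Option (List Char × List Char)
  | [] => none
  | sep :: rest =>
    match rpartAux sep s with
    | some (h, t) =>
      if (t = ['Y'] ∨ t = ['Y', '_', 't'] ∨ t = ['Y', '_', 'm']) ∧ h ≠ [] then some (h, t)
      else pyBLoop s rest
    | none => pyBLoop s rest

def split_ligand_payload_key_py_alt (payload_key : String) : Option (String × String) :=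
  (pyBLoop payload_key.toList [[':', ':'], ['/']]).map
    (fun r => (String.ofList r.1, String.ofList r.2))

-- ===== PRECONDITION & SPEC =====
def Spec_split_ligand_payload_key_py (payload_key : String) (out : Option (String × String)) : Prop := out = split_ligand_payload_key_py_alt payload_key
instance (payload_key : String) (out : Option (String × String)) : Decidable (Spec_split_ligand_payload_key_py payload_key out) := by unfold Spec_split_ligand_payload_key_py; infer_instance

-- ===== CLAIM (what is proved, stated in full; the proofs are below) =====
def Claim_equal_split_ligand_payload_key_py : Prop := ∀ (payload_key : String), Dom_split_ligand_payload_key_py payload_key → Spec_split_ligand_payload_key_py payload_key (split_ligand_payload_key_py payload_key)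

-- ===== LEMMAS AND PROOFS =====

-- 'sep occurs in sep ++ t only at position 0'
def noLater (sep t : List Char) : Prop := ∀ i, 0 < i → ¬ sep <+: ((sep ++ t).drop i)

lemma noLater_of_bounded (sep t : List Char) (hsep : sep ≠ [])
    (h : ∀ i ∈ List.range (sep.length + t.length), 0 < i → ¬ sep <+: ((sep ++ t).drop i)) :
    noLater sep t := by
  intro i hi hp
  by_cases hlt : i < sep.length + t.length
  · exact h i (List.mem_range.mpr hlt) hi hp
  · rw [List.drop_eq_nil_of_le (by simp only [List.length_append]; omega)] at hp
    exact hsep (List.prefix_nil.mp hp)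

lemma rpartAux_none (sep : List Char) (hsep : sep ≠ []) :
    ∀ s : List Char, rpartAux sep s = none → ∀ i, ¬ sep <+: s.drop i := by
  intro s
  induction s with
  | nil =>
    intro _ i hp
    rw [List.drop_nil] at hp
    exact hsep (List.prefix_nil.mp hp)
  | cons c rest ih =>
    intro h i hp
    simp only [rpartAux] at h
    cases hr : rpartAux sep rest with
    | some p => rw [hr] at h; cases p; simp at h
    | none =>
      rw [hr] at h
      by_cases hpre : sep.isPrefixOf (c :: rest)
      · simp [hpre] at h
      · cases i with
        | zero => exact hpre (List.isPrefixOf_iff_prefix.mpr (by simpa using hp))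
        | succ j => exact ih hr j (by simpa using hp)

lemma rpartAux_eq_some_iff (sep : List Char) (hsep : sep ≠ []) :
    ∀ s h t : List Char, rpartAux sep s = some (h, t) ↔ (s = h ++ sep ++ t ∧ noLater sep t) := by
  intro s
  induction s with
  | nil =>
    intro h t
    simp only [rpartAux]
    constructor
    · intro hc; cases hc
    · rintro ⟨hs, -⟩
      have := congrArg List.length hs
      simp only [List.length_append, List.length_nil] at this
      have : 0 < sep.length := List.length_pos_of_ne_nil hsep
      omega
  | cons c rest ih =>
    intro h t
    simp only [rpartAux]
    cases hr : rpartAux sep rest with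
    | some p =>
      obtain ⟨h', t'⟩ := p
      obtain ⟨hrest, hnl'⟩ := (ih h' t').mp hr
      constructor
      · rintro heq
        injection heq with heq'
        obtain ⟨rfl, rfl⟩ := Prod.mk.injEq .. ▸ (by exact Prod.mk.inj heq' : c :: h' = h ∧ t' = t)
        exact ⟨by simp [hrest], hnl'⟩
      · rintro ⟨hs, hnl⟩
        cases h with
        | nil =>
          exfalso
          apply hnl (1 + h'.length) (by omega)
          have hs' : sep ++ t = c :: rest := by simpa using hs.symm
          rw [hs']
          have : (c :: rest).drop (1 + h'.length) = sep ++ t' := by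
            rw [add_comm, List.drop_succ_cons, hrest, List.append_assoc]
            simp
          rw [this]
          exact List.prefix_append _ _
        | cons d h₂ =>
          simp only [List.cons_append, List.cons.injEq] at hs
          obtain ⟨rfl, hs2⟩ := hs
          have := (ih h₂ t).mpr ⟨by simpa using hs2, hnl⟩
          rw [hr] at this
          injection this with this
          obtain ⟨h1, h2⟩ := Prod.mk.inj this
          simp [h1, h2]
    | none =>
      by_cases hpre : sep.isPrefixOf (c :: rest)
      · have hp : sep <+: c :: rest := List.isPrefixOf_iff_prefix.mp hpre
        obtain ⟨tail, htail⟩ := hp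
        have hdrop : (c :: rest).drop sep.length = tail := by
          rw [← htail]; simp
        rw [if_pos hpre]
        constructor
        · intro heq
          injection heq with heq'
          obtain ⟨rfl, rfl⟩ := Prod.mk.inj heq'
          refine ⟨by rw [hdrop]; simpa using htail.symm, ?_⟩
          intro i hi hpfx
          have hst : sep ++ (c :: rest).drop sep.length = c :: rest := by rw [hdrop, htail]
          rw [hst] at hpfx
          cases i with
          | zero => omega
          | succ j => exact rpartAux_none sep hsep rest hr j (by simpa using hpfx)
        · rintro ⟨hs, hnl⟩
          cases h with
          | nil =>
            simp only [List.nil_append] at hs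
            rw [hs] at htail
            have : t = tail := by
              have := List.append_cancel_left htail
              exact this.symm
            simp [this, hdrop]
          | cons d h₂ =>
            exfalso
            simp only [List.cons_append, List.cons.injEq] at hs
            obtain ⟨rfl, hs2⟩ := hs
            apply rpartAux_none sep hsep rest hr h₂.length
            rw [show rest.drop h₂.length = sep ++ t by rw [hs2, List.append_assoc]; simp]
            exact List.prefix_append _ _
      · rw [if_neg hpre]
        constructor
        · intro hc; cases hc
        · rintro ⟨hs, hnl⟩
          exfalso
          cases h with
          | nil =>
            apply hpre
            apply List.isPrefixOf_iff_prefix.mpr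
            rw [hs]; simp
          | cons d h₂ =>
            simp only [List.cons_append, List.cons.injEq] at hs
            obtain ⟨rfl, hs2⟩ := hs
            apply rpartAux_none sep hsep rest hr h₂.length
            rw [show rest.drop h₂.length = sep ++ t by rw [hs2, List.append_assoc]; simp]
            exact List.prefix_append _ _

lemma rpart_found (sep name pre : List Char) (hsep : sep ≠ []) (hnl : noLater sep name) :
    rpartAux sep (pre ++ sep ++ name) = some (pre, name) :=
  (rpartAux_eq_some_iff sep hsep _ pre name).mpr ⟨rfl, hnl⟩

lemma not_suffix_of_suffix {u v s : List Char} (hv : v <:+ s) (huv : ¬ u <:+ v) (hvu : ¬ v <:+ u) :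
    ¬ u <:+ s :=
  fun hu => (List.suffix_or_suffix_of_suffix hu hv).elim huv hvu

lemma noLater_dec (sep t : List Char) (hsep : sep ≠ [])
    (h : ∀ i ∈ List.range (sep.length + t.length), 0 < i → ¬ sep.isPrefixOf ((sep ++ t).drop i) = true) :
    noLater sep t :=
  noLater_of_bounded sep t hsep (fun i hi hi0 hp =>
    h i hi hi0 (List.isPrefixOf_iff_prefix.mpr hp))

lemma slice_strip (pre u : List Char) (hu : u ≠ []) :
    PySem.List.slice (pre ++ u) none (some (-(u.length : Int))) = pre := by
  rw [PySem.List.slice_to_neg_natCast _ _ (List.length_pos_of_ne_nil hu)]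
  rw [show (pre ++ u).length - u.length = pre.length by simp [List.length_append]]
  simp

lemma esw_false {u : List Char} (s : List Char) (h : ¬ u <:+ s) :
    PySem.Chars.endswith s u = false := by
  rw [← Bool.not_eq_true, PySem.Chars.endswith_iff]; exact h

lemma bloop_skip_colon (s : List Char)
    (hs1 : ¬ [':', ':', 'Y'] <:+ s) (hs3 : ¬ [':', ':', 'Y', '_', 't'] <:+ s)
    (hs5 : ¬ [':', ':', 'Y', '_', 'm'] <:+ s) :
    pyBLoop s [[':', ':'], ['/']] = pyBLoop s [['/']] := by
  cases hr : rpartAux [':', ':'] s with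
  | none => simp [pyBLoop, hr]
  | some p =>
    obtain ⟨h', t'⟩ := p
    obtain ⟨hs, -⟩ := (rpartAux_eq_some_iff [':', ':'] (by decide) s h' t').mp hr
    have hcond : ¬ ((t' = ['Y'] ∨ t' = ['Y', '_', 't'] ∨ t' = ['Y', '_', 'm']) ∧ h' ≠ []) := by
      rintro ⟨(rfl | rfl | rfl), -⟩
      · exact hs1 ⟨h', by simp [hs]⟩
      · exact hs3 ⟨h', by simp [hs]⟩
      · exact hs5 ⟨h', by simp [hs]⟩
    simp [pyBLoop, hr, hcond]

lemma bloop_skip_slash (s : List Char)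
    (hs2 : ¬ ['/', 'Y'] <:+ s) (hs4 : ¬ ['/', 'Y', '_', 't'] <:+ s)
    (hs6 : ¬ ['/', 'Y', '_', 'm'] <:+ s) :
    pyBLoop s [['/']] = none := by
  cases hr : rpartAux ['/'] s with
  | none => simp [pyBLoop, hr]
  | some p =>
    obtain ⟨h', t'⟩ := p
    obtain ⟨hs, -⟩ := (rpartAux_eq_some_iff ['/'] (by decide) s h' t').mp hr
    have hcond : ¬ ((t' = ['Y'] ∨ t' = ['Y', '_', 't'] ∨ t' = ['Y', '_', 'm']) ∧ h' ≠ []) := by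
      rintro ⟨(rfl | rfl | rfl), -⟩
      · exact hs2 ⟨h', by simp [hs]⟩
      · exact hs4 ⟨h', by simp [hs]⟩
      · exact hs6 ⟨h', by simp [hs]⟩
    simp [pyBLoop, hr, hcond]

lemma core (s : List Char) :
    pyAOuter s [['Y'], ['Y', '_', 't'], ['Y', '_', 'm']] = pyBLoop s [[':', ':'], ['/']] := by
  by_cases h1 : [':', ':', 'Y'] <:+ s
  · obtain ⟨pre, rfl⟩ := h1
    by_cases hpre : pre = []
    · subst hpre; decide
    · have hrp : rpartAux [':', ':'] (pre ++ [':', ':', 'Y']) = some (pre, ['Y']) := by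
        have := rpart_found [':', ':'] ['Y'] pre (by decide)
          (noLater_dec _ _ (by decide) (by decide))
        simpa using this
      have hsid := slice_strip pre [':', ':', 'Y'] (by decide)
      norm_num at hsid
      have he : PySem.Chars.endswith (pre ++ [':', ':', 'Y']) [':', ':', 'Y'] = true :=
        (PySem.Chars.endswith_iff _ _).mpr ⟨pre, rfl⟩
      simp [pyAOuter, pyAInner, pyBLoop, he, hrp, hpre, hsid]
  · by_cases h3 : [':', ':', 'Y', '_', 't'] <:+ s
    · have h2 : ¬ ['/', 'Y'] <:+ s := not_suffix_of_suffix h3 (by decide) (by decide)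
      obtain ⟨pre, rfl⟩ := h3
      by_cases hpre : pre = []
      · subst hpre; decide
      · have hrp : rpartAux [':', ':'] (pre ++ [':', ':', 'Y', '_', 't']) = some (pre, ['Y', '_', 't']) := by
          have := rpart_found [':', ':'] ['Y', '_', 't'] pre (by decide)
            (noLater_dec _ _ (by decide) (by decide))
          simpa using this
        have hsid := slice_strip pre [':', ':', 'Y', '_', 't'] (by decide)
        norm_num at hsid
        have he : PySem.Chars.endswith (pre ++ [':', ':', 'Y', '_', 't']) [':', ':', 'Y', '_', 't'] = true :=
          (PySem.Chars.endswith_iff _ _).mpr ⟨pre, rfl⟩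
        have e1 := esw_false (u := [':', ':', 'Y']) _ h1
        have e2 := esw_false (u := ['/', 'Y']) _ h2
        simp [pyAOuter, pyAInner, pyBLoop, he, e1, e2, hrp, hpre, hsid]
    · by_cases h5 : [':', ':', 'Y', '_', 'm'] <:+ s
      · have h2 : ¬ ['/', 'Y'] <:+ s := not_suffix_of_suffix h5 (by decide) (by decide)
        have h4 : ¬ ['/', 'Y', '_', 't'] <:+ s := not_suffix_of_suffix h5 (by decide) (by decide)
        obtain ⟨pre, rfl⟩ := h5
        by_cases hpre : pre = []
        · subst hpre; decide
        · have hrp : rpartAux [':', ':'] (pre ++ [':', ':', 'Y', '_', 'm']) = some (pre, ['Y', '_', 'm']) := by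
            have := rpart_found [':', ':'] ['Y', '_', 'm'] pre (by decide)
              (noLater_dec _ _ (by decide) (by decide))
            simpa using this
          have hsid := slice_strip pre [':', ':', 'Y', '_', 'm'] (by decide)
          norm_num at hsid
          have he : PySem.Chars.endswith (pre ++ [':', ':', 'Y', '_', 'm']) [':', ':', 'Y', '_', 'm'] = true :=
            (PySem.Chars.endswith_iff _ _).mpr ⟨pre, rfl⟩
          have e1 := esw_false (u := [':', ':', 'Y']) _ h1
          have e2 := esw_false (u := ['/', 'Y']) _ h2
          have e3 := esw_false (u := [':', ':', 'Y', '_', 't']) _ h3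
          have e4 := esw_false (u := ['/', 'Y', '_', 't']) _ h4
          simp [pyAOuter, pyAInner, pyBLoop, he, e1, e2, e3, e4, hrp, hpre, hsid]
      · by_cases h2 : ['/', 'Y'] <:+ s
        · rw [bloop_skip_colon s h1 h3 h5]
          obtain ⟨pre, rfl⟩ := h2
          by_cases hpre : pre = []
          · subst hpre; decide
          · have hrp : rpartAux ['/'] (pre ++ ['/', 'Y']) = some (pre, ['Y']) := by
              have := rpart_found ['/'] ['Y'] pre (by decide)
                (noLater_dec _ _ (by decide) (by decide))
              simpa using this
            have hsid := slice_strip pre ['/', 'Y'] (by decide)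
            norm_num at hsid
            have he : PySem.Chars.endswith (pre ++ ['/', 'Y']) ['/', 'Y'] = true :=
              (PySem.Chars.endswith_iff _ _).mpr ⟨pre, rfl⟩
            have e1 := esw_false (u := [':', ':', 'Y']) _ h1
            simp [pyAOuter, pyAInner, pyBLoop, he, e1, hrp, hpre, hsid]
        · by_cases h4 : ['/', 'Y', '_', 't'] <:+ s
          · rw [bloop_skip_colon s h1 h3 h5]
            obtain ⟨pre, rfl⟩ := h4
            by_cases hpre : pre = []
            · subst hpre; decide
            · have hrp : rpartAux ['/'] (pre ++ ['/', 'Y', '_', 't']) = some (pre, ['Y', '_', 't']) := by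
                have := rpart_found ['/'] ['Y', '_', 't'] pre (by decide)
                  (noLater_dec _ _ (by decide) (by decide))
                simpa using this
              have hsid := slice_strip pre ['/', 'Y', '_', 't'] (by decide)
              norm_num at hsid
              have he : PySem.Chars.endswith (pre ++ ['/', 'Y', '_', 't']) ['/', 'Y', '_', 't'] = true :=
                (PySem.Chars.endswith_iff _ _).mpr ⟨pre, rfl⟩
              have e1 := esw_false (u := [':', ':', 'Y']) _ h1
              have e2 := esw_false (u := ['/', 'Y']) _ h2
              have e3 := esw_false (u := [':', ':', 'Y', '_', 't']) _ h3
              simp [pyAOuter, pyAInner, pyBLoop, he, e1, e2, e3, hrp, hpre, hsid]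
          · by_cases h6 : ['/', 'Y', '_', 'm'] <:+ s
            · rw [bloop_skip_colon s h1 h3 h5]
              obtain ⟨pre, rfl⟩ := h6
              by_cases hpre : pre = []
              · subst hpre; decide
              · have hrp : rpartAux ['/'] (pre ++ ['/', 'Y', '_', 'm']) = some (pre, ['Y', '_', 'm']) := by
                  have := rpart_found ['/'] ['Y', '_', 'm'] pre (by decide)
                    (noLater_dec _ _ (by decide) (by decide))
                  simpa using this
                have hsid := slice_strip pre ['/', 'Y', '_', 'm'] (by decide)
                norm_num at hsid
                have he : PySem.Chars.endswith (pre ++ ['/', 'Y', '_', 'm']) ['/', 'Y', '_', 'm'] = true :=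
                  (PySem.Chars.endswith_iff _ _).mpr ⟨pre, rfl⟩
                have e1 := esw_false (u := [':', ':', 'Y']) _ h1
                have e2 := esw_false (u := ['/', 'Y']) _ h2
                have e3 := esw_false (u := [':', ':', 'Y', '_', 't']) _ h3
                have e4 := esw_false (u := ['/', 'Y', '_', 't']) _ h4
                have e5 := esw_false (u := [':', ':', 'Y', '_', 'm']) _ h5
                simp [pyAOuter, pyAInner, pyBLoop, he, e1, e2, e3, e4, e5, hrp, hpre, hsid]
            · rw [bloop_skip_colon s h1 h3 h5, bloop_skip_slash s h2 h4 h6]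
              have e1 := esw_false (u := [':', ':', 'Y']) _ h1
              have e2 := esw_false (u := ['/', 'Y']) _ h2
              have e3 := esw_false (u := [':', ':', 'Y', '_', 't']) _ h3
              have e4 := esw_false (u := ['/', 'Y', '_', 't']) _ h4
              have e5 := esw_false (u := [':', ':', 'Y', '_', 'm']) _ h5
              have e6 := esw_false (u := ['/', 'Y', '_', 'm']) _ h6
              simp [pyAOuter, pyAInner, e1, e2, e3, e4, e5, e6]

-- ===== VERDICT (by name: the statement is the Claim_ definition above) =====
theorem split_ligand_payload_key_py_spec : Claim_equal_split_ligand_payload_key_py := by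
  intro payload_key _
  unfold Spec_split_ligand_payload_key_py split_ligand_payload_key_py split_ligand_payload_key_py_alt
  rw [core]
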